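-- pv_equiv track=rewrite | github.com/miiya369/analysisHAL_miya | scripts/python_code-set/lib/lattice/phase_shift_Luscher.py | num_point_r2
-- ===== SOURCE A (Python) =====
-- def num_point_r2(a_r2):
--     """
--     Return the number of r^2 which satisfies x^2 + y^2 + z^2 = r^2, where x, y, z are in Z.
--     """
--     ret = 0
--     for x in range(-a_r2, a_r2+1):
--         for y in range(-a_r2, a_r2+1):
--             for z in range(-a_r2, a_r2+1):
--                 if (x**2 + y**2 + z**2 == a_r2):
--                     ret += 1
--     return ret
-- ===== SOURCE B (Python) =====
-- def num_point_r2(a_r2):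
--     """
--     Count lattice points (x, y, z) with x^2 + y^2 + z^2 == a_r2: scan only the
--     non-negative quadrant of (x, y) up to isqrt(a_r2), decide z by membership
--     of the remainder in a precomputed set of squares, and weight each hit by
--     2^(number of non-zero coordinates) for sign symmetry.
--     """
--     if a_r2 < 0:
--         return 0
--     s = 0
--     for k in range(1, a_r2 + 1):
--         if k * k <= a_r2:
--             s = k
--     squares = set()
--     for z in range(s + 1):
--         squares.add(z * z)
--     ret = 0
--     for x in range(s + 1):
--         for y in range(s + 1):
--             rem = a_r2 - x * x - y * y
--             if rem in squares:
--                 w = (1 if x == 0 else 2) * (1 if y == 0 else 2) * (1 if rem == 0 else 2)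
--                 ret += w
--     return ret
-- ===== Notes on version B (the rewrite author's own statement) =====
-- stated objective: faster
-- what changed: Replaces A's triple scan of the full cube with a scan of the non-negative (x,y) quadrant up to isqrt of the input, deciding z by membership of the remainder in a precomputed set of squares and weighting each hit by sign symmetry (doubled once per non-zero coordinate).
import Mathlib
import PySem

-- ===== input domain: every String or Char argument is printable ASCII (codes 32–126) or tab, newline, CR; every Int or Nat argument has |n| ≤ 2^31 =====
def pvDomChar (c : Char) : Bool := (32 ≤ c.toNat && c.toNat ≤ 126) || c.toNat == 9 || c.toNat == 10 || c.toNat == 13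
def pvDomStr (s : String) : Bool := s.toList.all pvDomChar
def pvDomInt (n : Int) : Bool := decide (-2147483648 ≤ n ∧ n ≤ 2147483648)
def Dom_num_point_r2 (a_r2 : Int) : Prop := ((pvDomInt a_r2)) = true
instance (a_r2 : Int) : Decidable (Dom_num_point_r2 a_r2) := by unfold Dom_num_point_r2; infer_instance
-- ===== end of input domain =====

-- B replaces A's scan over the full cube [-n, n]^3 by a scan of the non-negative (x, y)
-- quadrant up to isqrt(n), deciding z by membership of the remainder in a precomputed
-- set of squares and weighting each hit by sign symmetry (measured faster).

-- ===== PORT A =====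
def num_point_r2 (a_r2 : Int) : Int :=
  (PySem.List.pyRange (-a_r2) (a_r2 + 1) 1).foldl (fun ret x =>
    (PySem.List.pyRange (-a_r2) (a_r2 + 1) 1).foldl (fun ret y =>
      (PySem.List.pyRange (-a_r2) (a_r2 + 1) 1).foldl (fun ret z =>
        if x ^ 2 + y ^ 2 + z ^ 2 = a_r2 then ret + 1 else ret) ret) ret) 0

-- ===== PORT B =====
-- the 'for k in range(1, a_r2+1): if k*k <= a_r2: s = k' loop of Source B
def bIsqrt (n : Int) : Int :=
  (PySem.List.pyRange 1 (n + 1) 1).foldl (fun s k => if k * k ≤ n then k else s) 0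

-- the 'for z in range(s+1): squares.add(z*z)' loop of Source B
def bSquares (s : Int) : PySem.Set Int :=
  (PySem.List.pyRange 0 (s + 1) 1).foldl (fun sq z => PySem.Set.add sq (z * z)) PySem.Set.empty

def num_point_r2_alt (a_r2 : Int) : Int :=
  if a_r2 < 0 then 0
  else
    let s := bIsqrt a_r2
    let squares := bSquares s
    (PySem.List.pyRange 0 (s + 1) 1).foldl (fun ret x =>
      (PySem.List.pyRange 0 (s + 1) 1).foldl (fun ret y =>
        let rem := a_r2 - x * x - y * y
        if rem ∈ squares then
          ret + (if x = 0 then (1 : Int) else 2) * (if y = 0 then 1 else 2) *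
              (if rem = 0 then 1 else 2)
        else ret) ret) 0

-- ===== PRECONDITION & SPEC =====
def Spec_num_point_r2 (a_r2 : Int) (out : Int) : Prop := out = num_point_r2_alt a_r2
instance (a_r2 : Int) (out : Int) : Decidable (Spec_num_point_r2 a_r2 out) := by unfold Spec_num_point_r2; infer_instance

-- ===== CLAIM (what is proved, stated in full; the proofs are below) =====
def Claim_equal_num_point_r2 : Prop := ∀ (a_r2 : Int), Dom_num_point_r2 a_r2 → Spec_num_point_r2 a_r2 (num_point_r2 a_r2)

-- ===== LEMMAS AND PROOFS =====

-- a '+='-style fold over range(a, b+1) is a Finset.Icc sum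
theorem foldl_add_Icc (a b : Int) (g : Int → Int) (init : Int) :
    (PySem.List.pyRange a (b + 1) 1).foldl (fun acc t => acc + g t) init
      = init + ∑ t ∈ Finset.Icc a b, g t := by
  rw [PySem.List.foldl_add]
  congr 1
  have hnd : (PySem.List.pyRange a (b + 1) 1).Nodup := PySem.List.nodup_pyRange_one a (b + 1)
  have hfs : (PySem.List.pyRange a (b + 1) 1).toFinset = Finset.Icc a b := by
    ext x
    simp only [List.mem_toFinset, PySem.List.mem_pyRange_one, Finset.mem_Icc]
    omega
  rw [← hfs, List.sum_toFinset _ hnd]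

-- a counting loop 'if p(t): ret += 1' over range(a, b+1) is an Icc sum of 0/1 terms
theorem foldl_ite_add_Icc (a b : Int) (p : Int → Prop) [DecidablePred p] (init : Int) :
    (PySem.List.pyRange a (b + 1) 1).foldl (fun acc t => if p t then acc + 1 else acc) init
      = init + ∑ t ∈ Finset.Icc a b, (if p t then (1 : Int) else 0) := by
  rw [PySem.List.foldl_congr_mem _ _ (fun acc t => acc + if p t then (1 : Int) else 0) _
    (by intro acc t _; simp only; split_ifs <;> omega)]
  exact foldl_add_Icc a b _ init

-- the k-loop of Source B computes the integer square root of n (n ≥ 0)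
theorem bIsqrt_aux (n : Int) (hn : 0 ≤ n) (m : Nat) :
    0 ≤ (PySem.List.pyRange 1 ((m : Int) + 1) 1).foldl (fun s k => if k * k ≤ n then k else s) 0 ∧
    (PySem.List.pyRange 1 ((m : Int) + 1) 1).foldl (fun s k => if k * k ≤ n then k else s) 0 ≤ m ∧
    ((PySem.List.pyRange 1 ((m : Int) + 1) 1).foldl (fun s k => if k * k ≤ n then k else s) 0) *
      ((PySem.List.pyRange 1 ((m : Int) + 1) 1).foldl (fun s k => if k * k ≤ n then k else s) 0) ≤ n ∧
    ∀ k : Int, 1 ≤ k → k ≤ m → k * k ≤ n →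
      k ≤ (PySem.List.pyRange 1 ((m : Int) + 1) 1).foldl (fun s k => if k * k ≤ n then k else s) 0 := by
  induction m with
  | zero =>
    rw [PySem.List.pyRange_one_eq_nil (by norm_num)]
    simp
    exact ⟨hn, by omega⟩
  | succ m ih =>
    have hsplit : PySem.List.pyRange 1 ((m + 1 : Nat) + 1) 1
        = PySem.List.pyRange 1 ((m : Int) + 1) 1 ++ [(m : Int) + 1] := by
      push_cast
      exact PySem.List.pyRange_one_succ_right (by omega)
    rw [hsplit, List.foldl_append]
    obtain ⟨ih0, ihm, ihsq, ihmax⟩ := ih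
    simp only [List.foldl_cons, List.foldl_nil]
    split_ifs with hc
    · refine ⟨by omega, by omega, hc, ?_⟩
      intro k hk1 hkm hkk
      push_cast at hkm ⊢
      omega
    · refine ⟨ih0, by omega, ihsq, ?_⟩
      intro k hk1 hkm hkk
      have : k ≤ (m : Int) := by
        by_contra h
        have : k = (m : Int) + 1 := by push_cast at hkm; omega
        subst this
        exact hc hkk
      exact ihmax k hk1 this hkk

theorem bIsqrt_spec (n : Int) (hn : 0 ≤ n) :
    0 ≤ bIsqrt n ∧ bIsqrt n * bIsqrt n ≤ n ∧ bIsqrt n ≤ n ∧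
      ∀ k : Int, 0 ≤ k → k * k ≤ n → k ≤ bIsqrt n := by
  have hm := bIsqrt_aux n hn n.toNat
  rw [show ((n.toNat : Int)) = n from Int.toNat_of_nonneg hn] at hm
  unfold bIsqrt
  obtain ⟨h0, hle, hsq, hmax⟩ := hm
  refine ⟨h0, hsq, by omega, ?_⟩
  intro k hk0 hkk
  rcases eq_or_lt_of_le hk0 with h | h
  · omega
  · exact hmax k (by omega) (by nlinarith) hkk

theorem mem_bSquares (s t : Int) :
    t ∈ bSquares s ↔ ∃ z : Int, 0 ≤ z ∧ z ≤ s ∧ t = z * z := by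
  unfold bSquares
  rw [PySem.Set.mem_foldl_add]
  simp only [PySem.Set.empty, List.not_mem_nil, false_or, PySem.List.mem_pyRange_one]
  constructor
  · rintro ⟨z, ⟨h0, h1⟩, rfl⟩
    exact ⟨z, h0, by omega, rfl⟩
  · rintro ⟨z, h0, h1, rfl⟩
    exact ⟨z, ⟨h0, by omega⟩, rfl⟩

-- the innermost z-loop of A counts the square roots of the remainder
theorem count_z (n s rem : Int) (hn : 0 ≤ n) (hrem : rem ≤ n)
    (hmax : ∀ k : Int, 0 ≤ k → k * k ≤ n → k ≤ s) :
    (∑ z ∈ Finset.Icc (-n) n, (if z * z = rem then (1 : Int) else 0))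
      = if rem ∈ bSquares s then (if rem = 0 then (1 : Int) else 2) else 0 := by
  by_cases hex : ∃ z : Int, 0 ≤ z ∧ z ≤ s ∧ rem = z * z
  · rw [if_pos ((mem_bSquares s rem).mpr hex)]
    obtain ⟨z0, hz00, hz0s, hz0sq⟩ := hex
    rw [Finset.sum_boole]
    by_cases h0 : rem = 0
    · rw [if_pos h0]
      have : {z ∈ Finset.Icc (-n) n | z * z = rem} = {0} := by
        ext z
        simp only [Finset.mem_filter, Finset.mem_Icc, Finset.mem_singleton]
        constructor
        · rintro ⟨_, hz⟩
          have : z * z = 0 := by omega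
          exact mul_self_eq_zero.mp this
        · rintro rfl
          refine ⟨⟨by omega, by omega⟩, by omega⟩
      rw [this]
      norm_num
    · rw [if_neg h0]
      have hz01 : 1 ≤ z0 := by
        rcases eq_or_lt_of_le hz00 with h | h
        · exfalso; apply h0; rw [hz0sq, ← h]; ring
        · omega
      have hz0n : z0 ≤ n := by nlinarith
      have : {z ∈ Finset.Icc (-n) n | z * z = rem} = {z0, -z0} := by
        ext z
        simp only [Finset.mem_filter, Finset.mem_Icc, Finset.mem_insert, Finset.mem_singleton]
        constructor
        · rintro ⟨_, hz⟩
          have : z * z = z0 * z0 := by rw [hz, hz0sq]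
          rcases mul_self_eq_mul_self_iff.mp this with h | h
          · left; exact h
          · right; exact h
        · rintro (rfl | rfl)
          · exact ⟨⟨by omega, by omega⟩, hz0sq.symm⟩
          · exact ⟨⟨by omega, by omega⟩, by rw [neg_mul_neg]; exact hz0sq.symm⟩
      rw [this]
      rw [Finset.card_insert_of_notMem (by simp; omega), Finset.card_singleton]
      norm_num
  · rw [if_neg (fun hmem => hex ((mem_bSquares s rem).mp hmem))]
    apply Finset.sum_eq_zero
    intro z hz
    rw [if_neg]
    intro hzz
    apply hex
    refine ⟨|z|, abs_nonneg z, ?_, by rw [abs_mul_abs_self, hzz]⟩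
    exact hmax |z| (abs_nonneg z) (by rw [abs_mul_abs_self, hzz]; omega)

-- summing an even function over Icc (-n) n = weighted sum over Icc 0 n
theorem sum_Icc_symm (n : Int) (hn : 0 ≤ n) (g : Int → Int) (hg : ∀ t, g (-t) = g t) :
    ∑ t ∈ Finset.Icc (-n) n, g t
      = ∑ t ∈ Finset.Icc 0 n, (if t = 0 then (1 : Int) else 2) * g t := by
  have hsplit : Finset.Icc (-n) n = Finset.Icc (-n) (-1) ∪ Finset.Icc 0 n := by
    ext x; simp only [Finset.mem_Icc, Finset.mem_union]; omega
  have hdisj : Disjoint (Finset.Icc (-n) (-1)) (Finset.Icc 0 n) := by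
    simp only [Finset.disjoint_left, Finset.mem_Icc]
    intro x h1 h2; omega
  have himg : Finset.Icc (-n) (-1) = (Finset.Icc 1 n).image (fun t => -t) := by
    ext x
    simp only [Finset.mem_Icc, Finset.mem_image]
    constructor
    · intro h; exact ⟨-x, by omega, by omega⟩
    · rintro ⟨t, ht, rfl⟩; omega
  have hins : Finset.Icc (0 : Int) n = insert 0 (Finset.Icc 1 n) := by
    ext x; simp only [Finset.mem_Icc, Finset.mem_insert]; omega
  have h0notin : (0 : Int) ∉ Finset.Icc (1 : Int) n := by simp
  rw [hsplit, Finset.sum_union hdisj, himg,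
    Finset.sum_image (by intro a _ b _ h; simp only at h; omega)]
  have hneg : ∑ t ∈ Finset.Icc (1 : Int) n, g (-t) = ∑ t ∈ Finset.Icc (1 : Int) n, g t :=
    Finset.sum_congr rfl (fun t _ => hg t)
  rw [hneg, hins, Finset.sum_insert h0notin, Finset.sum_insert h0notin]
  have hw : ∑ t ∈ Finset.Icc (1 : Int) n, (if t = 0 then (1 : Int) else 2) * g t
      = ∑ t ∈ Finset.Icc (1 : Int) n, (g t + g t) := by
    apply Finset.sum_congr rfl
    intro t ht
    simp only [Finset.mem_Icc] at ht
    rw [if_neg (by omega)]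
    ring
  rw [hw, Finset.sum_add_distrib]
  norm_num
  ring

-- a sum over Icc 0 n of a function vanishing above s collapses to Icc 0 s
theorem sum_Icc_shrink (s n : Int) (hsn : s ≤ n) (g : Int → Int)
    (h0 : ∀ t, s < t → t ≤ n → g t = 0) :
    ∑ t ∈ Finset.Icc 0 n, g t = ∑ t ∈ Finset.Icc 0 s, g t := by
  symm
  apply Finset.sum_subset
  · intro t ht
    simp only [Finset.mem_Icc] at *
    omega
  · intro t ht hnt
    simp only [Finset.mem_Icc] at *
    exact h0 t (by omega) (by omega)

-- ===== VERDICT (by name: the statement is the Claim_ definition above) =====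
theorem num_point_r2_spec : Claim_equal_num_point_r2 := by
  unfold Claim_equal_num_point_r2
  intro n _
  unfold Spec_num_point_r2
  by_cases hneg : n < 0
  · unfold num_point_r2 num_point_r2_alt
    rw [if_pos hneg, PySem.List.pyRange_one_eq_nil (by omega)]
    rfl
  rw [not_lt] at hneg
  obtain ⟨hs0, hssq, hsn, hsmax⟩ := bIsqrt_spec n hneg
  set s := bIsqrt n with hs
  -- W r: the number of z with z*z = r, as B tests it
  set W : Int → Int := fun r => if r ∈ bSquares s then (if r = 0 then (1 : Int) else 2) else 0
    with hW
  have hWneg : ∀ r : Int, r < 0 → W r = 0 := by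
    intro r hr
    rw [hW]
    simp only
    rw [if_neg]
    intro hmem
    obtain ⟨z, hz0, _, rfl⟩ := (mem_bSquares s r).mp hmem
    nlinarith
  -- A as a triple Icc sum
  have hA : num_point_r2 n
      = ∑ x ∈ Finset.Icc (-n) n, ∑ y ∈ Finset.Icc (-n) n, ∑ z ∈ Finset.Icc (-n) n,
          (if x ^ 2 + y ^ 2 + z ^ 2 = n then (1 : Int) else 0) := by
    unfold num_point_r2
    rw [PySem.List.foldl_congr_mem _ _
      (fun ret x => ret + ∑ y ∈ Finset.Icc (-n) n, ∑ z ∈ Finset.Icc (-n) n,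
          (if x ^ 2 + y ^ 2 + z ^ 2 = n then (1 : Int) else 0)) _
      (by
        intro ret x _
        rw [PySem.List.foldl_congr_mem _ _
          (fun ret y => ret + ∑ z ∈ Finset.Icc (-n) n,
              (if x ^ 2 + y ^ 2 + z ^ 2 = n then (1 : Int) else 0)) _
          (by
            intro ret y _
            exact foldl_ite_add_Icc (-n) n (fun z => x ^ 2 + y ^ 2 + z ^ 2 = n) ret)]
        exact foldl_add_Icc (-n) n _ ret)]
    rw [foldl_add_Icc (-n) n _ 0]
    ring
  -- collapse the z-loop
  have hA2 : num_point_r2 n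
      = ∑ x ∈ Finset.Icc (-n) n, ∑ y ∈ Finset.Icc (-n) n, W (n - x * x - y * y) := by
    rw [hA]
    apply Finset.sum_congr rfl; intro x _
    apply Finset.sum_congr rfl; intro y _
    have hxx := mul_self_nonneg x
    have hyy := mul_self_nonneg y
    have hcond : ∀ z : Int, (x ^ 2 + y ^ 2 + z ^ 2 = n) ↔ (z * z = n - x * x - y * y) := by
      intro z
      simp only [pow_two]
      constructor <;> intro h <;> omega
    rw [Finset.sum_congr rfl (fun z _ => if_congr (hcond z) rfl rfl)]
    exact count_z n s (n - x * x - y * y) hneg (by omega) hsmax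
  -- fold the y-range and then the x-range onto [0, n] with symmetry weights
  have hA3 : num_point_r2 n
      = ∑ x ∈ Finset.Icc 0 n, (if x = 0 then (1 : Int) else 2) *
          ∑ y ∈ Finset.Icc 0 n, (if y = 0 then (1 : Int) else 2) * W (n - x * x - y * y) := by
    rw [hA2]
    rw [sum_Icc_symm n hneg _ (by
      intro t
      apply Finset.sum_congr rfl
      intro y _
      rw [neg_mul_neg])]
    apply Finset.sum_congr rfl; intro x _
    congr 1
    exact sum_Icc_symm n hneg _ (by intro t; rw [neg_mul_neg])
  -- shrink both ranges to [0, s]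
  have hxbig : ∀ x : Int, s < x → x ≤ n → 0 ≤ x → n - x * x < 0 := by
    intro x hsx hxn hx0
    by_contra h
    rw [not_lt] at h
    have := hsmax x hx0 (by omega)
    omega
  have hA4 : num_point_r2 n
      = ∑ x ∈ Finset.Icc 0 s, (if x = 0 then (1 : Int) else 2) *
          ∑ y ∈ Finset.Icc 0 s, (if y = 0 then (1 : Int) else 2) * W (n - x * x - y * y) := by
    rw [hA3, sum_Icc_shrink s n hsn _ (by
      intro x hsx hxn
      have : ∑ y ∈ Finset.Icc 0 n, (if y = 0 then (1 : Int) else 2) * W (n - x * x - y * y)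
          = 0 := by
        apply Finset.sum_eq_zero
        intro y hy
        simp only [Finset.mem_Icc] at hy
        have hyy := mul_self_nonneg y
        rw [hWneg _ (by have := hxbig x hsx hxn (by omega); omega)]
        ring
      rw [this]
      ring)]
    apply Finset.sum_congr rfl; intro x hx
    simp only [Finset.mem_Icc] at hx
    congr 1
    apply sum_Icc_shrink s n hsn
    intro y hsy hyn
    have hxx := mul_self_nonneg x
    rw [hWneg _ (by have := hxbig y hsy hyn (by omega); omega)]
    ring
  -- B as a double Icc sum
  have hB : num_point_r2_alt n
      = ∑ x ∈ Finset.Icc 0 s, ∑ y ∈ Finset.Icc 0 s,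
          (if n - x * x - y * y ∈ bSquares s then
            (if x = 0 then (1 : Int) else 2) * (if y = 0 then 1 else 2) *
              (if n - x * x - y * y = 0 then 1 else 2)
          else 0) := by
    unfold num_point_r2_alt
    rw [if_neg (by omega)]
    simp only [← hs]
    rw [PySem.List.foldl_congr_mem _ _
      (fun ret x => ret + ∑ y ∈ Finset.Icc 0 s,
          (if n - x * x - y * y ∈ bSquares s then
            (if x = 0 then (1 : Int) else 2) * (if y = 0 then 1 else 2) *
              (if n - x * x - y * y = 0 then 1 else 2)
          else 0)) _
      (by
        intro ret x _
        rw [PySem.List.foldl_congr_mem _ _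
          (fun ret y => ret +
            (if n - x * x - y * y ∈ bSquares s then
              (if x = 0 then (1 : Int) else 2) * (if y = 0 then 1 else 2) *
                (if n - x * x - y * y = 0 then 1 else 2)
            else 0)) _
          (by
            intro ret y _
            simp only
            split_ifs <;> omega)]
        exact foldl_add_Icc 0 s _ ret)]
    rw [foldl_add_Icc 0 s _ 0]
    ring
  -- the two sums agree term by term
  rw [hA4, hB]
  apply Finset.sum_congr rfl; intro x _
  rw [Finset.mul_sum]
  apply Finset.sum_congr rfl; intro y _
  rw [hW]
  simp only
  split_ifs <;> ring
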